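-- pv_equiv track=rewrite | github.com/YB947624487/farben2020 | demo_files/hechangdui.py | right_max
-- ===== SOURCE A (Python) =====
-- def right_max(arr):
--     n = len(arr)
--     res = [1] * n
--     for i in range(n - 1, -1, -1):
--         for j in range(i + 1, n):
--             if arr[j] < arr[i] and res[j] + 1 > res[i]:
--                 res[i] = res[j] + 1
--     return res
-- ===== SOURCE B (Python) =====
-- def right_max(arr):
--     # O(n log n): value compression + functional segment tree (prefix-max queries,
--     # point max-updates) processed right-to-left.
--     n = len(arr)
--     if n == 0:
--         return []
--     vals = sorted(set(arr))
--     rank = {v: i for i, v in enumerate(vals)}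
--     m = len(vals)
--
--     def build(lo, hi):
--         if hi - lo == 1:
--             return ('leaf', 0)
--         mid = (lo + hi) // 2
--         return ('node', mid, build(lo, mid), build(mid, hi), 0)
--
--     def query(t, lo, hi, k):
--         # max stored value over ranks in [lo, hi) intersected with [0, k)
--         if k <= lo:
--             return 0
--         if k >= hi:
--             return t[-1]
--         if t[0] == 'leaf':
--             return t[1]
--         _, mid, l, r, _ = t
--         return max(query(l, lo, mid, k), query(r, mid, hi, k))
--
--     def update(t, pos, val):
--         # point update: stored[pos] = max(stored[pos], val); returns new tree
--         if t[0] == 'leaf':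
--             return ('leaf', max(t[1], val))
--         _, mid, l, r, mv = t
--         if pos < mid:
--             return ('node', mid, update(l, pos, val), r, max(mv, val))
--         return ('node', mid, l, update(r, pos, val), max(mv, val))
--
--     t = build(0, m)
--     out = []
--     for x in reversed(arr):
--         r = rank[x]
--         length = query(t, 0, m, r) + 1
--         t = update(t, r, length)
--         out.append(length)
--     out.reverse()
--     return out
-- ===== Notes on version B (the rewrite author's own statement) =====
-- stated objective: faster
-- what changed: Replaces the O(n^2) nested-loop DP (for each index, scan the whole suffix) by a right-to-left single pass with value compression and a functional segment tree supporting prefix-max queries and point max-updates.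
import Mathlib
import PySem

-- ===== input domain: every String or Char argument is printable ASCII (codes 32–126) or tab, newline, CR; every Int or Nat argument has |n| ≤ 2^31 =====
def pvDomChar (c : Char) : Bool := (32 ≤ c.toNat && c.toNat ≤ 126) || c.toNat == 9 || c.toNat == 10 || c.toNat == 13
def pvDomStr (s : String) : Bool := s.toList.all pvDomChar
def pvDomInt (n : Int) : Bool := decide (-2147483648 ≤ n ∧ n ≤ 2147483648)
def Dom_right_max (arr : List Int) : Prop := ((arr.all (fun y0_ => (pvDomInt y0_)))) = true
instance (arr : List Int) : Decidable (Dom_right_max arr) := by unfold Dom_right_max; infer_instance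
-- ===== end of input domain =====

-- B replaces A's O(n^2) nested-loop DP by value compression plus a functional
-- segment tree (prefix-max query, point max-update) processed right-to-left.

-- ===== PORT A =====
-- indices i, j always lie in [0, n), so pyGetD/pySetD with default 0 are exact here
def right_max (arr : List Int) : List Int :=
  let n : Int := arr.length
  (PySem.List.pyRange (n - 1) (-1) (-1)).foldl
    (fun res i =>
      (PySem.List.pyRange (i + 1) n).foldl
        (fun r j =>
          if PySem.List.pyGetD arr j 0 < PySem.List.pyGetD arr i 0 ∧
             PySem.List.pyGetD r j 0 + 1 > PySem.List.pyGetD r i 0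
          then PySem.List.pySetD r i (PySem.List.pyGetD r j 0 + 1)
          else r)
        res)
    (List.replicate n.toNat 1)

-- ===== PORT B =====
-- the trees built by Source B's build/update: ('leaf', v) / ('node', mid, l, r, v)
inductive PvTree : Type
  | leaf : Int → PvTree
  | node : Int → PvTree → PvTree → Int → PvTree
deriving DecidableEq, Repr

def pvMaxOf : PvTree → Int
  | PvTree.leaf v => v
  | PvTree.node _ _ _ v => v

-- Source B's build(lo, hi); the '≤ 1' guard (Python tests '== 1') only makes the
-- recursion total: Python never calls build with hi - lo < 1
def pvBuild (lo hi : Int) : PvTree :=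
  if hi - lo ≤ 1 then PvTree.leaf 0
  else
    let mid := PySem.Int.floordiv (lo + hi) 2
    PvTree.node mid (pvBuild lo mid) (pvBuild mid hi) 0
termination_by (hi - lo).toNat
decreasing_by
  all_goals
    simp only [PySem.Int.floordiv_eq_ediv_of_pos (a := lo + hi) (by norm_num : (0:Int) < 2)]
    omega

-- Source B's query(t, lo, hi, k): max stored value over ranks in [lo, hi) ∩ [0, k)
def pvQuery (t : PvTree) (lo hi k : Int) : Int :=
  if k ≤ lo then 0
  else if hi ≤ k then pvMaxOf t
  else
    match t with
    | PvTree.leaf v => v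
    | PvTree.node mid l r _ => max (pvQuery l lo mid k) (pvQuery r mid hi k)

-- Source B's update(t, pos, val): stored[pos] = max(stored[pos], val)
def pvUpdate (t : PvTree) (pos val : Int) : PvTree :=
  match t with
  | PvTree.leaf v => PvTree.leaf (max v val)
  | PvTree.node mid l r mv =>
    if pos < mid then PvTree.node mid (pvUpdate l pos val) r (max mv val)
    else PvTree.node mid l (pvUpdate r pos val) (max mv val)

def right_max_alt (arr : List Int) : List Int :=
  if arr = [] then []
  else
    let vals := PySem.List.sorted (PySem.Set.ofList arr) (fun v => v) false
    -- rank = {v: i for i, v in enumerate(vals)}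
    let rank := (PySem.List.enumerate vals).foldl
      (fun d (p : Int × Int) => d.insert p.2 p.1) (PySem.Dict.empty (κ := Int) (ν := Int))
    let m : Int := vals.length
    let res := arr.reverse.foldl
      (fun (p : PvTree × List Int) x =>
        let r := rank.getD x 0        -- x is always a key of rank, so getD is exact
        let len := pvQuery p.1 0 m r + 1
        (pvUpdate p.1 r len, p.2 ++ [len]))
      (pvBuild 0 m, [])
    res.2.reverse

-- ===== PRECONDITION & SPEC =====
def Spec_right_max (arr : List Int) (out : List Int) : Prop := out = right_max_alt arr
instance (arr : List Int) (out : List Int) : Decidable (Spec_right_max arr out) := by unfold Spec_right_max; infer_instance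

-- ===== CLAIM (what is proved, stated in full; the proofs are below) =====
def Claim_equal_right_max : Prop := ∀ (arr : List Int), Dom_right_max arr → Spec_right_max arr (right_max arr)

-- ===== LEMMAS AND PROOFS =====

-- max over the second components of the pairs whose first component is < x (0 if none)
def pvMaxLT (x : Int) (ps : List (Int × Int)) : Int :=
  ps.foldl (fun m p => if p.1 < x then max m p.2 else m) 0

-- the common functional characterization of both programs:
-- res[i] = 1 + max{ res[j] | j > i, arr[j] < arr[i] }
def pvSpec : List Int → List Int
  | [] => []
  | x :: rest => (1 + pvMaxLT x (rest.zip (pvSpec rest))) :: pvSpec rest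

lemma pvSpec_length (s : List Int) : (pvSpec s).length = s.length := by
  induction s with
  | nil => rfl
  | cons x rest ih => simp [pvSpec, ih]

lemma pvFoldl_max_comm (step : Int → (Int × Int) → Int)
    (h : ∀ a b p, step (max a b) p = max (step a p) b) :
    ∀ (ps : List (Int × Int)) (a b : Int),
      ps.foldl step (max a b) = max (ps.foldl step a) b := by
  intro ps
  induction ps with
  | nil => intro a b; rfl
  | cons p t ih => intro a b; simp only [List.foldl_cons, h a b p, ih]

lemma pvMaxLT_cons (x v l : Int) (t : List (Int × Int)) :
    pvMaxLT x ((v, l) :: t) = if v < x then max (pvMaxLT x t) l else pvMaxLT x t := by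
  unfold pvMaxLT
  simp only [List.foldl_cons]
  by_cases h : v < x
  · simp only [if_pos h]
    have := pvFoldl_max_comm (fun m p => if p.1 < x then max m p.2 else m)
      (by intro a b p; by_cases hp : p.1 < x <;> simp [hp] <;> omega) t 0 l
    simpa using this
  · simp [h]

lemma pvMaxLT_nonneg (x : Int) (ps : List (Int × Int)) : 0 ≤ pvMaxLT x ps := by
  induction ps with
  | nil => simp [pvMaxLT]
  | cons p t ih => obtain ⟨v, l⟩ := p; rw [pvMaxLT_cons]; split_ifs <;> omega

-- ---------- A side ----------

lemma pvGetD_setD (res : List Int) (k i w : Int)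
    (h0 : 0 ≤ k) (h1 : k < res.length) (h2 : 0 ≤ i) :
    PySem.List.pyGetD (PySem.List.pySetD res k w) i 0 =
      if i = k then w else PySem.List.pyGetD res i 0 := by
  have hk' : ((k.toNat : Nat) : Int) = k := Int.toNat_of_nonneg h0
  have hi' : ((i.toNat : Nat) : Int) = i := Int.toNat_of_nonneg h2
  have h := PySem.List.pyGetD_pySetD_natCast res k.toNat i.toNat w 0 (by omega)
  rw [hk', hi'] at h
  rw [h]
  by_cases hik : i = k
  · rw [if_pos (by omega), if_pos hik]
  · rw [if_neg (by omega), if_neg hik]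

lemma pvSetD_self (res : List Int) (k : Int) (h0 : 0 ≤ k) (h1 : k < res.length) :
    PySem.List.pySetD res k (PySem.List.pyGetD res k 0) = res := by
  have hk' : ((k.toNat : Nat) : Int) = k := Int.toNat_of_nonneg h0
  rw [← hk', PySem.List.pySetD_natCast, PySem.List.pyGetD_natCast]
  rw [List.getD_eq_getElem res 0 (by omega)]
  simp

lemma pvSetD_setD (res : List Int) (k : Int) (a w : Int) (h0 : 0 ≤ k) :
    PySem.List.pySetD (PySem.List.pySetD res k a) k w = PySem.List.pySetD res k w := by
  have hk' : ((k.toNat : Nat) : Int) = k := Int.toNat_of_nonneg h0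
  rw [← hk', PySem.List.pySetD_natCast, PySem.List.pySetD_natCast, PySem.List.pySetD_natCast]
  exact List.set_set a

lemma pvInner (x : Int) :
    ∀ (vs ls : List Int) (j : Int) (k : Int) (arr res : List Int) (c : Int),
      0 ≤ k → k < j →
      vs.length = ls.length →
      j + vs.length = (arr.length : Int) →
      res.length = arr.length →
      (∀ t : Nat, t < vs.length →
        PySem.List.pyGetD arr (j + t) 0 = vs.getD t 0 ∧
        PySem.List.pyGetD res (j + t) 0 = ls.getD t 0) →
      PySem.List.pyGetD arr k 0 = x →
      PySem.List.pyGetD res k 0 = c →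
      (PySem.List.pyRange j (arr.length : Int)).foldl
        (fun r jj =>
          if PySem.List.pyGetD arr jj 0 < PySem.List.pyGetD arr k 0 ∧
             PySem.List.pyGetD r jj 0 + 1 > PySem.List.pyGetD r k 0
          then PySem.List.pySetD r k (PySem.List.pyGetD r jj 0 + 1)
          else r) res
      = PySem.List.pySetD res k
          ((vs.zip ls).foldl (fun m p => if p.1 < x ∧ p.2 + 1 > m then p.2 + 1 else m) c) := by
  intro vs
  induction vs with
  | nil =>
    intro ls j k arr res c hk0 hkj hlen hsum hreslen hpt hx hc
    have hj : j = (arr.length : Int) := by simpa using hsum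
    have hemp : PySem.List.pyRange j (arr.length : Int) = [] := by
      rw [PySem.List.pyRange_one]; simp [hj]
    rw [hemp]
    simp only [List.foldl_nil, List.zip_nil_left]
    rw [← hc, pvSetD_self res k hk0 (by omega)]
  | cons v vt ih =>
    intro ls j k arr res c hk0 hkj hlen hsum hreslen hpt hx hc
    cases ls with
    | nil => simp at hlen
    | cons l lt =>
      have hvt : vt.length = lt.length := by simpa using hlen
      have hsum' : j + 1 + (vt.length : Int) = (arr.length : Int) := by
        simp only [List.length_cons] at hsum; push_cast at hsum ⊢; omega
      have hjlt : j < (arr.length : Int) := by omega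
      have hrl : (res.length : Int) = (arr.length : Int) := by exact_mod_cast hreslen
      have h0 := hpt 0 (by simp)
      have hav : PySem.List.pyGetD arr j 0 = v := by simpa using h0.1
      have hrv : PySem.List.pyGetD res j 0 = l := by simpa using h0.2
      rw [PySem.List.pyRange_one_cons hjlt, List.foldl_cons]
      have hstep : (if PySem.List.pyGetD arr j 0 < PySem.List.pyGetD arr k 0 ∧
             PySem.List.pyGetD res j 0 + 1 > PySem.List.pyGetD res k 0
          then PySem.List.pySetD res k (PySem.List.pyGetD res j 0 + 1) else res)
          = if v < x ∧ l + 1 > c then PySem.List.pySetD res k (l + 1) else res := by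
        rw [hav, hx, hrv, hc]
      rw [hstep]
      have harr_t : ∀ t : Nat, t < vt.length →
          PySem.List.pyGetD arr (j + 1 + (t : Int)) 0 = vt.getD t 0 ∧
          PySem.List.pyGetD res (j + 1 + (t : Int)) 0 = lt.getD t 0 := by
        intro t ht
        have h' := hpt (t + 1) (by simpa using Nat.succ_lt_succ ht)
        have hcast : j + ((t + 1 : Nat) : Int) = j + 1 + (t : Int) := by push_cast; ring
        rw [hcast] at h'
        simpa using h'
      by_cases hcond : v < x ∧ l + 1 > c
      · rw [if_pos hcond]
        have hres' := ih lt (j + 1) k arr (PySem.List.pySetD res k (l + 1)) (l + 1)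
          hk0 (by omega) hvt hsum'
          (by rw [PySem.List.length_pySetD]; exact hreslen)
          (by
            intro t ht
            refine ⟨(harr_t t ht).1, ?_⟩
            rw [pvGetD_setD res k (j + 1 + (t : Int)) (l + 1) hk0 (by omega) (by omega),
              if_neg (by omega)]
            exact (harr_t t ht).2)
          hx
          (by rw [pvGetD_setD res k k (l + 1) hk0 (by omega) hk0, if_pos rfl])
        rw [hres', pvSetD_setD res k (l + 1) _ hk0]
        congr 1
        rw [List.zip_cons_cons, List.foldl_cons]
        have hr2 : (if (v, l).1 < x ∧ (v, l).2 + 1 > c then (v, l).2 + 1 else c) = l + 1 := by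
          show (if v < x ∧ l + 1 > c then l + 1 else c) = l + 1
          rw [if_pos hcond]
        rw [hr2]
      · rw [if_neg hcond]
        have hres' := ih lt (j + 1) k arr res c
          hk0 (by omega) hvt hsum' hreslen
          (by intro t ht; exact harr_t t ht)
          hx hc
        rw [hres']
        congr 1
        rw [List.zip_cons_cons, List.foldl_cons]
        have hr2 : (if (v, l).1 < x ∧ (v, l).2 + 1 > c then (v, l).2 + 1 else c) = c := by
          show (if v < x ∧ l + 1 > c then l + 1 else c) = c
          rw [if_neg hcond]
        rw [hr2]

lemma pvInnerMax (x : Int) (ps : List (Int × Int)) (c : Int) :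
    ps.foldl (fun m p => if p.1 < x ∧ p.2 + 1 > m then p.2 + 1 else m) c
      = ps.foldl (fun m p => if p.1 < x then max m (p.2 + 1) else m) c := by
  have h : (fun (m : Int) (p : Int × Int) => if p.1 < x ∧ p.2 + 1 > m then p.2 + 1 else m)
      = fun m p => if p.1 < x then max m (p.2 + 1) else m := by
    funext m p
    split_ifs <;> omega
  rw [h]

lemma pvInnerOne (x : Int) (ps : List (Int × Int)) :
    ps.foldl (fun m p => if p.1 < x then max m (p.2 + 1) else m) 1 = 1 + pvMaxLT x ps := by
  induction ps with
  | nil => simp [pvMaxLT]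
  | cons p t ih =>
    obtain ⟨v, l⟩ := p
    simp only [List.foldl_cons]
    by_cases h : v < x
    · simp only [if_pos h]
      have := pvFoldl_max_comm (fun m p => if p.1 < x then max m (p.2 + 1) else m)
        (by intro a b p; by_cases hp : p.1 < x <;> simp [hp] <;> omega) t 1 (l + 1)
      rw [this, ih, pvMaxLT_cons, if_pos h]
      have := pvMaxLT_nonneg x t
      omega
    · simp only [if_neg h, ih, pvMaxLT_cons, if_neg h]

lemma pvOuter (arr : List Int) :
    ∀ (d k : Nat), k + d = arr.length →
      (PySem.List.pyRange (k : Int) (arr.length : Int)).foldr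
        (fun i res =>
          (PySem.List.pyRange (i + 1) (arr.length : Int)).foldl
            (fun r j =>
              if PySem.List.pyGetD arr j 0 < PySem.List.pyGetD arr i 0 ∧
                 PySem.List.pyGetD r j 0 + 1 > PySem.List.pyGetD r i 0
              then PySem.List.pySetD r i (PySem.List.pyGetD r j 0 + 1)
              else r)
            res)
        (List.replicate arr.length 1)
      = List.replicate k 1 ++ pvSpec (arr.drop k) := by
  intro d
  induction d with
  | zero =>
    intro k hk
    have hk' : k = arr.length := by omega
    have hemp : PySem.List.pyRange (k : Int) (arr.length : Int) = [] := by
      rw [PySem.List.pyRange_one]; simp [hk']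
    rw [hemp]
    simp [hk', pvSpec]
  | succ d ih =>
    intro k hk
    have hklt : k < arr.length := by omega
    have hkI : (k : Int) < (arr.length : Int) := by exact_mod_cast hklt
    have hih := ih (k + 1) (by omega)
    have hcast : ((k + 1 : Nat) : Int) = (k : Int) + 1 := by push_cast; ring
    rw [hcast] at hih
    rw [PySem.List.pyRange_one_cons hkI, List.foldr_cons, hih]
    set rest := arr.drop (k + 1) with hrest
    set L := pvSpec rest with hL
    set R := List.replicate (k + 1) 1 ++ L with hR
    have hLlen : L.length = rest.length := pvSpec_length rest
    have hrestlen : rest.length = arr.length - (k + 1) := by simp [hrest]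
    have hRlen : R.length = arr.length := by
      simp only [hR, List.length_append, List.length_replicate, hLlen, hrestlen]; omega
    have hx : PySem.List.pyGetD arr (k : Int) 0 = arr[k] := by
      rw [PySem.List.pyGetD_natCast, List.getD_eq_getElem arr 0 hklt]
    have hc : PySem.List.pyGetD R (k : Int) 0 = 1 := by
      rw [PySem.List.pyGetD_natCast, List.getD_eq_getElem R 0 (by omega)]
      simp only [hR]
      rw [List.getElem_append_left (by simp)]
      simp
    have hmain := pvInner arr[k] rest L ((k : Int) + 1) (k : Int) arr R 1
      (by positivity) (by omega)
      hLlen.symm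
      (by omega)
      hRlen
      (by
        intro t ht
        have htlt : k + 1 + t < arr.length := by omega
        have hcast2 : ((k : Int) + 1 + (t : Int)) = ((k + 1 + t : Nat) : Int) := by
          push_cast; ring
        constructor
        · rw [hcast2, PySem.List.pyGetD_natCast, List.getD_eq_getElem arr 0 htlt,
            List.getD_eq_getElem rest 0 ht]
          simp [hrest]
        · rw [hcast2, PySem.List.pyGetD_natCast, List.getD_eq_getElem R 0 (by omega),
            List.getD_eq_getElem L 0 (by omega)]
          simp only [hR]
          rw [List.getElem_append_right (by simp)]
          simp)
      hx hc
    rw [hmain, pvInnerMax, pvInnerOne]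
    have hdrop : arr.drop k = arr[k] :: rest := by
      rw [hrest]
      exact List.drop_eq_getElem_cons hklt
    rw [hdrop]
    have hkc : ((k : Nat) : Int) = (k : Int) := rfl
    rw [← hkc, PySem.List.pySetD_natCast, hR]
    simp only [pvSpec, ← hL]
    rw [List.replicate_succ', List.append_assoc]
    rw [List.set_append_right _ _ (by simp)]
    simp

lemma pvA_eq_spec (arr : List Int) : right_max arr = pvSpec arr := by
  show (PySem.List.pyRange ((arr.length : Int) - 1) (-1) (-1)).foldl
      (fun res i =>
        (PySem.List.pyRange (i + 1) (arr.length : Int)).foldl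
          (fun r j =>
            if PySem.List.pyGetD arr j 0 < PySem.List.pyGetD arr i 0 ∧
               PySem.List.pyGetD r j 0 + 1 > PySem.List.pyGetD r i 0
            then PySem.List.pySetD r i (PySem.List.pyGetD r j 0 + 1)
            else r)
          res)
      (List.replicate (arr.length : Int).toNat 1) = pvSpec arr
  rw [PySem.List.pyRange_neg_one_eq_reverse]
  have h1 : ((arr.length : Int) - 1) + 1 = (arr.length : Int) := by ring
  have h2 : ((-1 : Int) + 1) = 0 := by norm_num
  rw [h1, h2, List.foldl_reverse]
  have h3 : ((arr.length : Int)).toNat = arr.length := by omega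
  rw [h3]
  have h := pvOuter arr arr.length 0 (by omega)
  simpa using h

-- ---------- B side ----------

-- max(0, max of g over [lo, hi))
def pvRangeMax (g : Int → Int) (lo hi : Int) : Int :=
  if lo < hi then max (pvRangeMax g lo (hi - 1)) (g (hi - 1)) else 0
termination_by (hi - lo).toNat
decreasing_by omega

lemma pvRangeMax_unfold (g : Int → Int) (lo hi : Int) :
    pvRangeMax g lo hi = if lo < hi then max (pvRangeMax g lo (hi - 1)) (g (hi - 1)) else 0 := by
  rw [pvRangeMax]

def pvPointUpd (g : Int → Int) (p v : Int) : Int → Int :=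
  fun r => if r = p then max (g r) v else g r

def pvRepr : PvTree → Int → Int → (Int → Int) → Prop
  | PvTree.leaf v, lo, hi, g => hi = lo + 1 ∧ v = pvRangeMax g lo hi
  | PvTree.node mid l r v, lo, hi, g =>
      lo < mid ∧ mid < hi ∧ pvRepr l lo mid g ∧ pvRepr r mid hi g ∧ v = pvRangeMax g lo hi

lemma pvRepr_leaf_iff (v lo hi : Int) (g : Int → Int) :
    pvRepr (PvTree.leaf v) lo hi g ↔ (hi = lo + 1 ∧ v = pvRangeMax g lo hi) := Iff.rfl

lemma pvRepr_node_iff (mid : Int) (l r : PvTree) (v lo hi : Int) (g : Int → Int) :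
    pvRepr (PvTree.node mid l r v) lo hi g ↔
      (lo < mid ∧ mid < hi ∧ pvRepr l lo mid g ∧ pvRepr r mid hi g ∧
        v = pvRangeMax g lo hi) := Iff.rfl

lemma pvRangeMax_of_le (g : Int → Int) (lo hi : Int) (h : hi ≤ lo) :
    pvRangeMax g lo hi = 0 := by
  rw [pvRangeMax_unfold, if_neg (by omega)]

lemma pvRangeMax_nonneg (g : Int → Int) (lo hi : Int) : 0 ≤ pvRangeMax g lo hi := by
  by_cases h : lo < hi
  · rw [pvRangeMax_unfold, if_pos h]
    have := pvRangeMax_nonneg g lo (hi - 1)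
    omega
  · rw [pvRangeMax_unfold, if_neg h]
termination_by (hi - lo).toNat
decreasing_by omega

lemma pvRangeMax_congr (g g' : Int → Int) (lo hi : Int)
    (h : ∀ i, lo ≤ i → i < hi → g i = g' i) :
    pvRangeMax g lo hi = pvRangeMax g' lo hi := by
  by_cases hlt : lo < hi
  · rw [pvRangeMax_unfold g lo hi, pvRangeMax_unfold g' lo hi, if_pos hlt, if_pos hlt]
    rw [pvRangeMax_congr g g' lo (hi - 1) (fun i h1 h2 => h i h1 (by omega)),
      h (hi - 1) (by omega) (by omega)]
  · rw [pvRangeMax_unfold g lo hi, pvRangeMax_unfold g' lo hi, if_neg hlt, if_neg hlt]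
termination_by (hi - lo).toNat
decreasing_by omega

lemma pvRangeMax_split (g : Int → Int) (lo mid hi : Int) (h1 : lo ≤ mid) (h2 : mid ≤ hi) :
    pvRangeMax g lo hi = max (pvRangeMax g lo mid) (pvRangeMax g mid hi) := by
  by_cases hlt : mid < hi
  · rw [pvRangeMax_unfold g lo hi, if_pos (by omega), pvRangeMax_unfold g mid hi, if_pos hlt]
    rw [pvRangeMax_split g lo mid (hi - 1) h1 (by omega)]
    omega
  · rw [pvRangeMax_of_le g mid hi (by omega)]
    have hne : hi = mid := by omega
    rw [hne]
    have := pvRangeMax_nonneg g lo mid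
    omega
termination_by (hi - mid).toNat
decreasing_by omega

lemma pvRangeMax_pointUpd (g : Int → Int) (p v lo hi : Int) (h1 : lo ≤ p) (h2 : p < hi) :
    pvRangeMax (pvPointUpd g p v) lo hi = max (pvRangeMax g lo hi) v := by
  rw [pvRangeMax_unfold (pvPointUpd g p v) lo hi, if_pos (by omega),
    pvRangeMax_unfold g lo hi, if_pos (by omega)]
  by_cases hp : p = hi - 1
  · have hcongr : pvRangeMax (pvPointUpd g p v) lo (hi - 1) = pvRangeMax g lo (hi - 1) := by
      apply pvRangeMax_congr
      intro i hi1 hi2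
      simp [pvPointUpd, show i ≠ p by omega]
    rw [hcongr]
    simp only [pvPointUpd]
    rw [if_pos hp.symm]
    omega
  · rw [pvRangeMax_pointUpd g p v lo (hi - 1) h1 (by omega)]
    simp only [pvPointUpd]
    rw [if_neg (by omega : ¬ hi - 1 = p)]
    omega
termination_by (hi - lo).toNat
decreasing_by omega

lemma pvRangeMax_pointUpd_out (g : Int → Int) (p v lo hi : Int) (h : p < lo ∨ hi ≤ p) :
    pvRangeMax (pvPointUpd g p v) lo hi = pvRangeMax g lo hi := by
  apply pvRangeMax_congr
  intro i h1 h2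
  simp [pvPointUpd, show i ≠ p by omega]

lemma pvRangeMax_zero (lo hi : Int) : pvRangeMax (fun _ => 0) lo hi = 0 := by
  by_cases h : lo < hi
  · rw [pvRangeMax_unfold, if_pos h, pvRangeMax_zero lo (hi - 1)]
    omega
  · rw [pvRangeMax_unfold, if_neg h]
termination_by (hi - lo).toNat
decreasing_by omega

lemma pvRepr_congr (t : PvTree) :
    ∀ (lo hi : Int) (g g' : Int → Int), pvRepr t lo hi g →
      (∀ i, lo ≤ i → i < hi → g i = g' i) → pvRepr t lo hi g' := by
  induction t with
  | leaf v =>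
    intro lo hi g g' hr h
    rw [pvRepr_leaf_iff] at hr ⊢
    exact ⟨hr.1, by rw [hr.2]; exact pvRangeMax_congr g g' lo hi h⟩
  | node mid l r v ihl ihr =>
    intro lo hi g g' hr h
    rw [pvRepr_node_iff] at hr ⊢
    obtain ⟨h1, h2, h3, h4, h5⟩ := hr
    exact ⟨h1, h2,
      ihl lo mid g g' h3 (fun i hi1 hi2 => h i hi1 (by omega)),
      ihr mid hi g g' h4 (fun i hi1 hi2 => h i (by omega) hi2),
      by rw [h5]; exact pvRangeMax_congr g g' lo hi h⟩

lemma pvBuild_repr : ∀ (lo hi : Int), lo < hi → pvRepr (pvBuild lo hi) lo hi (fun _ => 0) := by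
  intro lo hi hlt
  by_cases h : hi - lo ≤ 1
  · rw [pvBuild, if_pos h, pvRepr_leaf_iff]
    exact ⟨by omega, (pvRangeMax_zero lo hi).symm⟩
  · rw [pvBuild, if_neg h]
    have hmid : lo < PySem.Int.floordiv (lo + hi) 2 ∧ PySem.Int.floordiv (lo + hi) 2 < hi := by
      rw [PySem.Int.floordiv_eq_ediv_of_pos (by norm_num : (0:Int) < 2)]
      omega
    show pvRepr (PvTree.node (PySem.Int.floordiv (lo + hi) 2)
      (pvBuild lo (PySem.Int.floordiv (lo + hi) 2))
      (pvBuild (PySem.Int.floordiv (lo + hi) 2) hi) 0) lo hi (fun _ => 0)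
    rw [pvRepr_node_iff]
    exact ⟨hmid.1, hmid.2,
      pvBuild_repr lo _ hmid.1,
      pvBuild_repr _ hi hmid.2,
      (pvRangeMax_zero lo hi).symm⟩
termination_by lo hi => (hi - lo).toNat
decreasing_by
  all_goals
    simp only [PySem.Int.floordiv_eq_ediv_of_pos (a := lo + hi) (by norm_num : (0:Int) < 2)] at *
    omega

lemma pvQuery_repr (t : PvTree) :
    ∀ (lo hi k : Int) (g : Int → Int), pvRepr t lo hi g →
      pvQuery t lo hi k = pvRangeMax g lo (min k hi) := by
  induction t with
  | leaf v =>
    intro lo hi k g hr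
    rw [pvRepr_leaf_iff] at hr
    simp only [pvQuery]
    by_cases h1 : k ≤ lo
    · rw [if_pos h1, pvRangeMax_of_le g lo _ (by omega)]
    · rw [if_neg h1]
      by_cases h2 : hi ≤ k
      · rw [if_pos h2]
        rw [show pvMaxOf (PvTree.leaf v) = v from rfl, hr.2]
        congr 1
        omega
      · exfalso
        omega
  | node mid l r v ihl ihr =>
    intro lo hi k g hr
    rw [pvRepr_node_iff] at hr
    obtain ⟨h1, h2, h3, h4, h5⟩ := hr
    simp only [pvQuery]
    by_cases hk1 : k ≤ lo
    · rw [if_pos hk1, pvRangeMax_of_le g lo _ (by omega)]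
    · rw [if_neg hk1]
      by_cases hk2 : hi ≤ k
      · rw [if_pos hk2]
        rw [show pvMaxOf (PvTree.node mid l r v) = v from rfl, h5]
        congr 1
        omega
      · rw [if_neg hk2]
        rw [ihl lo mid k g h3, ihr mid hi k g h4]
        by_cases hkm : k ≤ mid
        · have e1 : min k mid = k := by omega
          have e2 : min k hi = k := by omega
          rw [e1, e2, pvRangeMax_of_le g mid k (by omega)]
          have := pvRangeMax_nonneg g lo k
          omega
        · have e1 : min k mid = mid := by omega
          have e2 : min k hi = k := by omega
          rw [e1, e2, pvRangeMax_split g lo mid k (by omega) (by omega)]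

lemma pvUpdate_repr (t : PvTree) :
    ∀ (lo hi pos val : Int) (g : Int → Int), pvRepr t lo hi g → lo ≤ pos → pos < hi →
      pvRepr (pvUpdate t pos val) lo hi (pvPointUpd g pos val) := by
  induction t with
  | leaf v =>
    intro lo hi pos val g hr hp1 hp2
    rw [pvRepr_leaf_iff] at hr
    show pvRepr (PvTree.leaf (max v val)) lo hi (pvPointUpd g pos val)
    rw [pvRepr_leaf_iff]
    refine ⟨hr.1, ?_⟩
    rw [pvRangeMax_pointUpd g pos val lo hi hp1 hp2, hr.2]
  | node mid l r v ihl ihr =>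
    intro lo hi pos val g hr hp1 hp2
    rw [pvRepr_node_iff] at hr
    obtain ⟨h1, h2, h3, h4, h5⟩ := hr
    simp only [pvUpdate]
    by_cases hp : pos < mid
    · rw [if_pos hp, pvRepr_node_iff]
      refine ⟨h1, h2, ihl lo mid pos val g h3 hp1 hp, ?_, ?_⟩
      · exact pvRepr_congr r mid hi g _ h4
          (fun i hi1 hi2 => by simp [pvPointUpd, show i ≠ pos by omega])
      · rw [pvRangeMax_pointUpd g pos val lo hi hp1 hp2, h5]
    · rw [if_neg hp, pvRepr_node_iff]
      refine ⟨h1, h2, ?_, ihr mid hi pos val g h4 (by omega) hp2, ?_⟩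
      · exact pvRepr_congr l lo mid g _ h3
          (fun i hi1 hi2 => by simp [pvPointUpd, show i ≠ pos by omega])
      · rw [pvRangeMax_pointUpd g pos val lo hi hp1 hp2, h5]

-- rank lookup: the dict built from enumerate(vals) maps x to its index in vals
lemma pvRank_getD (vals : List Int) (hnd : vals.Nodup) (x : Int) (hx : x ∈ vals) :
    ((PySem.List.enumerate vals).foldl
        (fun d (p : Int × Int) => d.insert p.2 p.1)
        (PySem.Dict.empty (κ := Int) (ν := Int))).getD x 0
      = ((List.idxOf x vals : Nat) : Int) := by
  have hmap : (PySem.List.enumerate vals).map (·.2) = vals := by simp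
  have hitems : ((PySem.List.enumerate vals).foldl
      (fun d (p : Int × Int) => d.insert p.2 p.1)
      (PySem.Dict.empty (κ := Int) (ν := Int))).items
      = (PySem.List.enumerate vals).map (fun p : Int × Int => (p.2, p.1)) := by
    have h := PySem.Dict.items_foldl_insert_fresh (PySem.List.enumerate vals)
      (fun p : Int × Int => p.2) (fun p : Int × Int => p.1) PySem.Dict.empty
      (by intro a _; simp) (by rw [hmap]; exact hnd)
    simpa using h
  have hkeysnd : ((PySem.List.enumerate vals).foldl
      (fun d (p : Int × Int) => d.insert p.2 p.1)
      (PySem.Dict.empty (κ := Int) (ν := Int))).keys.Nodup := by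
    have h := PySem.Dict.nodup_keys_foldl_insert_key (PySem.List.enumerate vals)
      (fun p : Int × Int => p.2) (fun _ p => p.1) (PySem.Dict.empty (κ := Int) (ν := Int))
      (by simp)
    simpa using h
  apply PySem.Dict.getD_of_mem_items _ _ hkeysnd
  rw [hitems]
  have hidx : List.idxOf x vals < vals.length := List.idxOf_lt_length_of_mem hx
  have hget : vals[List.idxOf x vals] = x := List.getElem_idxOf hidx
  rw [PySem.List.enumerate_eq_map_pyRange vals 0, List.map_map]
  have hmem : ((List.idxOf x vals : Nat) : Int) ∈ PySem.List.pyRange 0 (PySem.List.len vals) := by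
    rw [PySem.List.mem_pyRange_one]
    refine ⟨by positivity, ?_⟩
    simp only [PySem.List.len]
    exact_mod_cast hidx
  refine List.mem_map.mpr ⟨((List.idxOf x vals : Nat) : Int), hmem, ?_⟩
  simp only [Function.comp_apply]
  rw [PySem.List.pyGetD_natCast, List.getD_eq_getElem vals 0 hidx, hget]

-- order-isomorphism between values and their ranks in the sorted distinct list
lemma pvIdx_lt_iff (vals : List Int)
    (hmono : ∀ (p q : Nat) (hp : p < vals.length) (hq : q < vals.length), p ≤ q →
      vals[p]'hp ≤ vals[q]'hq)
    (x y : Int) (hx : x ∈ vals) (hy : y ∈ vals) :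
    y < x ↔ ((List.idxOf y vals : Nat) : Int) < ((List.idxOf x vals : Nat) : Int) := by
  have hix : List.idxOf x vals < vals.length := List.idxOf_lt_length_of_mem hx
  have hiy : List.idxOf y vals < vals.length := List.idxOf_lt_length_of_mem hy
  have hgx : vals[List.idxOf x vals] = x := List.getElem_idxOf hix
  have hgy : vals[List.idxOf y vals] = y := List.getElem_idxOf hiy
  constructor
  · intro hlt
    by_contra hge
    have h1 : vals[List.idxOf x vals] ≤ vals[List.idxOf y vals] :=
      hmono _ _ hix hiy (by omega)
    rw [hgx, hgy] at h1
    omega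
  · intro hlt
    have h1 : vals[List.idxOf y vals] ≤ vals[List.idxOf x vals] :=
      hmono _ _ hiy hix (by omega)
    rw [hgx, hgy] at h1
    have hne : y ≠ x := by
      intro h
      subst h
      exact lt_irrefl _ hlt
    omega

-- the "best chain length so far per rank" function after processing a suffix s
def pvGs (vals : List Int) : List Int → Int → Int
  | [] => fun _ => 0
  | x :: s => pvPointUpd (pvGs vals s) ((List.idxOf x vals : Nat) : Int)
      (1 + pvMaxLT x (s.zip (pvSpec s)))

lemma pvGs_rangeMax (vals : List Int)
    (hmono : ∀ (p q : Nat) (hp : p < vals.length) (hq : q < vals.length), p ≤ q →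
      vals[p]'hp ≤ vals[q]'hq)
    (x : Int) (hx : x ∈ vals) :
    ∀ (s : List Int), (∀ y ∈ s, y ∈ vals) →
      pvRangeMax (pvGs vals s) 0 ((List.idxOf x vals : Nat) : Int)
        = pvMaxLT x (s.zip (pvSpec s)) := by
  intro s
  induction s with
  | nil => intro _; simp [pvGs, pvMaxLT, pvRangeMax_zero]
  | cons y s ih =>
    intro hmem
    have hy : y ∈ vals := hmem y (by simp)
    have hs : ∀ z ∈ s, z ∈ vals := fun z hz => hmem z (by simp [hz])
    simp only [pvGs, pvSpec, List.zip_cons_cons]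
    rw [pvMaxLT_cons]
    by_cases hlt : y < x
    · rw [if_pos hlt]
      have hidx := (pvIdx_lt_iff vals hmono x y hx hy).mp hlt
      rw [pvRangeMax_pointUpd _ _ _ _ _ (by positivity) hidx, ih hs]
    · rw [if_neg hlt]
      have hidx : ¬ ((List.idxOf y vals : Nat) : Int) < ((List.idxOf x vals : Nat) : Int) := by
        intro h
        exact hlt ((pvIdx_lt_iff vals hmono x y hx hy).mpr h)
      rw [pvRangeMax_pointUpd_out _ _ _ _ _ (by omega), ih hs]

lemma pvFoldr_inv (vals : List Int) (hnd : vals.Nodup)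
    (hmono : ∀ (p q : Nat) (hp : p < vals.length) (hq : q < vals.length), p ≤ q →
      vals[p]'hp ≤ vals[q]'hq)
    (hm : 0 < vals.length) :
    ∀ (s : List Int), (∀ y ∈ s, y ∈ vals) →
      ∃ t, s.foldr
          (fun x (p : PvTree × List Int) =>
            (pvUpdate p.1
                (((PySem.List.enumerate vals).foldl
                    (fun d (q : Int × Int) => d.insert q.2 q.1)
                    (PySem.Dict.empty (κ := Int) (ν := Int))).getD x 0)
                (pvQuery p.1 0 (vals.length : Int)
                    (((PySem.List.enumerate vals).foldl
                        (fun d (q : Int × Int) => d.insert q.2 q.1)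
                        (PySem.Dict.empty (κ := Int) (ν := Int))).getD x 0) + 1),
              p.2 ++ [pvQuery p.1 0 (vals.length : Int)
                  (((PySem.List.enumerate vals).foldl
                      (fun d (q : Int × Int) => d.insert q.2 q.1)
                      (PySem.Dict.empty (κ := Int) (ν := Int))).getD x 0) + 1]))
          (pvBuild 0 (vals.length : Int), ([] : List Int))
        = (t, (pvSpec s).reverse) ∧ pvRepr t 0 (vals.length : Int) (pvGs vals s) := by
  intro s
  induction s with
  | nil =>
    intro _
    refine ⟨pvBuild 0 (vals.length : Int), rfl, ?_⟩
    have h := pvBuild_repr 0 (vals.length : Int) (by exact_mod_cast hm)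
    simpa [pvGs] using h
  | cons x s ih =>
    intro hmem
    have hx : x ∈ vals := hmem x (by simp)
    have hs : ∀ z ∈ s, z ∈ vals := fun z hz => hmem z (by simp [hz])
    obtain ⟨t, heq, hrepr⟩ := ih hs
    have hrk := pvRank_getD vals hnd x hx
    have hidx : List.idxOf x vals < vals.length := List.idxOf_lt_length_of_mem hx
    have hq : pvQuery t 0 (vals.length : Int) ((List.idxOf x vals : Nat) : Int)
        = pvMaxLT x (s.zip (pvSpec s)) := by
      rw [pvQuery_repr t 0 (vals.length : Int) _ _ hrepr]
      have hmin : min ((List.idxOf x vals : Nat) : Int) (vals.length : Int)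
          = ((List.idxOf x vals : Nat) : Int) := by
        have h' : ((List.idxOf x vals : Nat) : Int) < (vals.length : Int) := by exact_mod_cast hidx
        omega
      rw [hmin]
      exact pvGs_rangeMax vals hmono x hx s hs
    refine ⟨pvUpdate t ((List.idxOf x vals : Nat) : Int) (pvMaxLT x (s.zip (pvSpec s)) + 1),
      ?_, ?_⟩
    · rw [List.foldr_cons, heq]
      show (pvUpdate t _ _, (pvSpec s).reverse ++ [_]) = _
      rw [hrk, hq]
      refine congrArg₂ Prod.mk rfl ?_
      simp only [pvSpec, List.reverse_cons]
      congr 2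
      omega
    · have h := pvUpdate_repr t 0 (vals.length : Int) ((List.idxOf x vals : Nat) : Int)
        (pvMaxLT x (s.zip (pvSpec s)) + 1) (pvGs vals s) hrepr (by positivity)
        (by exact_mod_cast hidx)
      simp only [pvGs]
      have harg : (1 + pvMaxLT x (s.zip (pvSpec s))) = pvMaxLT x (s.zip (pvSpec s)) + 1 := by
        ring
      rw [harg]
      exact h

lemma pvB_eq_spec (arr : List Int) : right_max_alt arr = pvSpec arr := by
  unfold right_max_alt
  by_cases hnil : arr = []
  · rw [if_pos hnil, hnil]; rfl
  · rw [if_neg hnil]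
    show (List.foldl
        (fun (p : PvTree × List Int) x =>
          (pvUpdate p.1
              (((PySem.List.enumerate
                    (PySem.List.sorted (PySem.Set.ofList arr) (fun v => v) false)).foldl
                  (fun d (q : Int × Int) => d.insert q.2 q.1)
                  (PySem.Dict.empty (κ := Int) (ν := Int))).getD x 0)
              (pvQuery p.1 0
                  ((PySem.List.sorted (PySem.Set.ofList arr) (fun v => v) false).length : Int)
                  (((PySem.List.enumerate
                        (PySem.List.sorted (PySem.Set.ofList arr) (fun v => v) false)).foldl
                      (fun d (q : Int × Int) => d.insert q.2 q.1)
                      (PySem.Dict.empty (κ := Int) (ν := Int))).getD x 0) + 1),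
            p.2 ++ [pvQuery p.1 0
                  ((PySem.List.sorted (PySem.Set.ofList arr) (fun v => v) false).length : Int)
                  (((PySem.List.enumerate
                        (PySem.List.sorted (PySem.Set.ofList arr) (fun v => v) false)).foldl
                      (fun d (q : Int × Int) => d.insert q.2 q.1)
                      (PySem.Dict.empty (κ := Int) (ν := Int))).getD x 0) + 1]))
        (pvBuild 0 ((PySem.List.sorted (PySem.Set.ofList arr) (fun v => v) false).length : Int),
          ([] : List Int))
        arr.reverse).2.reverse = pvSpec arr
    set vals := PySem.List.sorted (PySem.Set.ofList arr) (fun v => v) false with hvals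
    have hperm : vals.Perm (PySem.Set.ofList arr) := PySem.List.sorted_perm _ _ _
    have hnd : vals.Nodup := List.Perm.nodup hperm.symm (PySem.Set.nodup_ofList arr)
    have hmono : ∀ (p q : Nat) (hp : p < vals.length) (hq : q < vals.length), p ≤ q →
        vals[p]'hp ≤ vals[q]'hq := by
      intro p q hp hq hpq
      exact PySem.List.sorted_id_getElem_mono (PySem.Set.ofList arr) hpq hq
    have hmem : ∀ y ∈ arr, y ∈ vals := by
      intro y hy
      have h1 : y ∈ PySem.Set.ofList arr := by simp [PySem.Set.mem_ofList, hy]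
      exact hperm.mem_iff.mpr h1
    have hm : 0 < vals.length := by
      rcases List.exists_mem_of_ne_nil arr hnil with ⟨a, ha⟩
      exact List.length_pos_of_mem (hmem a ha)
    obtain ⟨t, heq, _⟩ := pvFoldr_inv vals hnd hmono hm arr hmem
    rw [List.foldl_reverse]
    show (List.foldr
        (fun x (p : PvTree × List Int) =>
          (pvUpdate p.1
              (((PySem.List.enumerate vals).foldl
                  (fun d (q : Int × Int) => d.insert q.2 q.1)
                  (PySem.Dict.empty (κ := Int) (ν := Int))).getD x 0)
              (pvQuery p.1 0 (vals.length : Int)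
                  (((PySem.List.enumerate vals).foldl
                      (fun d (q : Int × Int) => d.insert q.2 q.1)
                      (PySem.Dict.empty (κ := Int) (ν := Int))).getD x 0) + 1),
            p.2 ++ [pvQuery p.1 0 (vals.length : Int)
                  (((PySem.List.enumerate vals).foldl
                      (fun d (q : Int × Int) => d.insert q.2 q.1)
                      (PySem.Dict.empty (κ := Int) (ν := Int))).getD x 0) + 1]))
        (pvBuild 0 (vals.length : Int), ([] : List Int)) arr).2.reverse = pvSpec arr
    rw [heq]
    simp

-- ===== VERDICT (by name: the statement is the Claim_ definition above) =====
theorem right_max_spec : Claim_equal_right_max := by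
  intro arr _
  unfold Spec_right_max
  rw [pvA_eq_spec, pvB_eq_spec]
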